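-- pv_equiv track=rewrite | github.com/aDifferentJT/writing-anima | backend/src/api/analysis.py | _norm_with_map
-- ===== SOURCE A (Python) =====
-- def _norm_with_map(text: str) -> tuple[str, list[int]]:
--     """
--     Collapse whitespace runs to a single space.
--     Returns (normalised_string, index_map) where index_map[i] is the position
--     in *text* of the i-th character in the normalised string.
--     """
--     norm_chars: list[str] = []
--     index_map: list[int] = []
--     i = 0
--     while i < len(text):
--         if text[i].isspace():
--             norm_chars.append(" ")
--             index_map.append(i)
--             i += 1
--             while i < len(text) and text[i].isspace():
--                 i += 1
--         else:
--             norm_chars.append(text[i])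
--             index_map.append(i)
--             i += 1
--     return "".join(norm_chars), index_map
-- ===== SOURCE B (Python) =====
-- def _norm_with_map(text: str) -> tuple[str, list[int]]:
--     """Two staged passes instead of a stateful scan: first select the kept
--     positions (every non-space character, plus the first character of each
--     whitespace run, detected locally by looking at the predecessor), then
--     build the normalised string from those positions."""
--     keep = [i for i in range(len(text))
--             if not text[i].isspace() or i == 0 or not text[i - 1].isspace()]
--     norm = "".join(" " if text[i].isspace() else text[i] for i in keep)
--     return norm, keep
-- ===== Notes on version B (the rewrite author's own statement) =====
-- stated objective: alternative
-- what changed: Replaces A's stateful nested-while scan (inner loop skipping each whitespace run) by two stateless staged passes: a comprehension selecting the kept positions via a local predecessor test (non-space, or first index of a space run), then a join mapping those positions to characters.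
import Mathlib
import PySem

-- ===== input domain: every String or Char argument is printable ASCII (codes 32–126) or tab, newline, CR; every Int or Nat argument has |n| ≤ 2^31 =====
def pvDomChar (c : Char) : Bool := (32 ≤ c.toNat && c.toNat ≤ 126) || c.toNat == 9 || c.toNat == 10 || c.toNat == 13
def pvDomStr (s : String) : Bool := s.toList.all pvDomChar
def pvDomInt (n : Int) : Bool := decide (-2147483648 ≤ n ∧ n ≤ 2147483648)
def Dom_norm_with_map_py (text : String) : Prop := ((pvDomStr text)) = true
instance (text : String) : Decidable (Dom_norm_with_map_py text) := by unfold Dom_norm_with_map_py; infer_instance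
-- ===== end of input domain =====

-- B replaces A's stateful nested-while scan by two stateless staged passes: select the
-- kept positions by a local predecessor test, then build the string from them; objective: alternative.

-- ===== PORT A =====
-- inner 'while i < len(text) and text[i].isspace(): i += 1' of A, on the remaining suffix
def pvSkipSpaces : List Char → Int → List Char × Int
  | [], i => ([], i)
  | c :: cs, i =>
    if PySem.Chars.isspace c then pvSkipSpaces cs (i + 1) else (c :: cs, i)

theorem pvSkipSpaces_length_le : ∀ (l : List Char) (i : Int), (pvSkipSpaces l i).1.length ≤ l.length := by
  intro l
  induction l with
  | nil => intro i; simp [pvSkipSpaces]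
  | cons c cs ih =>
    intro i
    by_cases h : PySem.Chars.isspace c = true
    · simpa [pvSkipSpaces, h] using Nat.le_succ_of_le (ih (i + 1))
    · simp [pvSkipSpaces, h]

-- outer while loop of A over the remaining suffix, i the current index
def pvAGo : List Char → Int → List Char × List Int
  | [], _ => ([], [])
  | c :: cs, i =>
    if PySem.Chars.isspace c then
      let p := pvSkipSpaces cs (i + 1)
      let r := pvAGo p.1 p.2
      (' ' :: r.1, i :: r.2)
    else
      let r := pvAGo cs (i + 1)
      (c :: r.1, i :: r.2)
termination_by l _ => l.length
decreasing_by
  · exact Nat.lt_succ_of_le (pvSkipSpaces_length_le cs (i + 1))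
  · simp

def norm_with_map_py (text : String) : String × List Int :=
  let r := pvAGo text.toList 0
  (String.ofList r.1, r.2)

-- ===== PORT B =====
-- B's comprehension filter: keep index i iff text[i] is non-space, or i == 0,
-- or text[i-1] is non-space (Python's 'or' only reaches text[i-1] when i != 0)
def pvKeepIdx (l : List Char) (i : Nat) : Bool :=
  !PySem.Chars.isspace (l.getD i ' ') || ((i == 0) || !PySem.Chars.isspace (l.getD (i - 1) ' '))

-- B's join generator: the character emitted at a kept position
def pvEmit (l : List Char) (i : Nat) : Char :=
  if PySem.Chars.isspace (l.getD i ' ') then ' ' else l.getD i ' '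

def norm_with_map_py_alt (text : String) : String × List Int :=
  let l := text.toList
  let keep := (List.range l.length).filter (pvKeepIdx l)
  (String.ofList (keep.map (pvEmit l)), keep.map (fun i => (i : Int)))

-- ===== PRECONDITION & SPEC =====
def Spec_norm_with_map_py (text : String) (out : String × List Int) : Prop := out = norm_with_map_py_alt text
instance (text : String) (out : String × List Int) : Decidable (Spec_norm_with_map_py text out) := by unfold Spec_norm_with_map_py; infer_instance

-- ===== CLAIM (what is proved, stated in full; the proofs are below) =====
def Claim_equal_norm_with_map_py : Prop := ∀ (text : String), Dom_norm_with_map_py text → Spec_norm_with_map_py text (norm_with_map_py text)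

-- ===== LEMMAS AND PROOFS =====

-- proof helper: A's scan rephrased over enumerate with an 'inside a space run' flag
def pvBGo : List (Int × Char) → Bool → List Char × List Int
  | [], _ => ([], [])
  | p :: ps, flag =>
    if PySem.Chars.isspace p.2 then
      if flag then pvBGo ps true
      else
        let r := pvBGo ps true
        (' ' :: r.1, p.1 :: r.2)
    else
      let r := pvBGo ps false
      (p.2 :: r.1, p.1 :: r.2)

-- in space mode, pvBGo skips exactly the whitespace run A's inner loop skips
theorem pvBGo_true_skip : ∀ (l : List Char) (i : Int),
    pvBGo (PySem.List.enumerate l i) true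
      = pvBGo (PySem.List.enumerate (pvSkipSpaces l i).1 (pvSkipSpaces l i).2) false := by
  intro l
  induction l with
  | nil => intro i; simp [pvSkipSpaces, pvBGo]
  | cons c cs ih =>
    intro i
    by_cases hs : PySem.Chars.isspace c = true
    · simpa [pvSkipSpaces, PySem.List.enumerate_cons, pvBGo, hs] using ih (i + 1)
    · simp [pvSkipSpaces, PySem.List.enumerate_cons, pvBGo, hs]

theorem pvAGo_eq_bGo : ∀ (n : Nat) (l : List Char) (i : Int), l.length ≤ n →
    pvAGo l i = pvBGo (PySem.List.enumerate l i) false := by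
  intro n
  induction n with
  | zero =>
    intro l i hl
    have : l = [] := List.eq_nil_of_length_eq_zero (Nat.le_zero.mp hl)
    subst this
    simp [pvAGo, pvBGo]
  | succ n ih =>
    intro l i hl
    cases l with
    | nil => simp [pvAGo, pvBGo]
    | cons c cs =>
      by_cases hs : PySem.Chars.isspace c = true
      · have hskip := pvSkipSpaces_length_le cs (i + 1)
        have hlen : (pvSkipSpaces cs (i + 1)).1.length ≤ n := by
          have : cs.length ≤ n := Nat.le_of_succ_le_succ hl
          omega
        rw [pvAGo]
        simp only [hs, if_pos, PySem.List.enumerate_cons, pvBGo]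
        rw [pvBGo_true_skip cs (i + 1),
            ← ih (pvSkipSpaces cs (i + 1)).1 (pvSkipSpaces cs (i + 1)).2 hlen]
        simp
      · rw [pvAGo]
        simp only [hs, PySem.List.enumerate_cons, pvBGo]
        rw [← ih cs (i + 1) (Nat.le_of_succ_le_succ hl)]
        simp

-- the flag-carrying scan equals B's filter/map over the index range
theorem pvBGo_eq_filter : ∀ (l full : List Char) (i : Nat), full.drop i = l →
    pvBGo (PySem.List.enumerate l (i : Int))
        (!(i == 0) && PySem.Chars.isspace (full.getD (i - 1) ' '))
      = (((List.range' i l.length).filter (pvKeepIdx full)).map (pvEmit full),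
         ((List.range' i l.length).filter (pvKeepIdx full)).map (fun j => (j : Int))) := by
  intro l
  induction l with
  | nil => intro full i _; simp [pvBGo]
  | cons c cs ih =>
    intro full i hdrop
    have hco : full[i]? = some c := by
      have h0 := congrArg (fun t => t[0]?) hdrop
      simpa using h0
    have hdrop' : full.drop (i + 1) = cs := by
      have h1 : List.drop 1 (full.drop i) = cs := by rw [hdrop]; simp
      rwa [List.drop_drop] at h1
    have hrec := ih full (i + 1) hdrop'
    have hflag' : (!((i + 1) == 0) && PySem.Chars.isspace (full.getD ((i + 1) - 1) ' '))
        = PySem.Chars.isspace c := by simp [List.getD, hco]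
    rw [hflag'] at hrec
    have hcast : ((i : Int) + 1) = (((i + 1 : Nat) : Int)) := by push_cast; ring
    have hkeep : pvKeepIdx full i
        = (!PySem.Chars.isspace c || !(!(i == 0) && PySem.Chars.isspace (full.getD (i - 1) ' '))) := by
      simp [pvKeepIdx, List.getD, hco]
    by_cases hs : PySem.Chars.isspace c = true
    · rw [hs] at hrec
      by_cases hp : (!(i == 0) && PySem.Chars.isspace (full.getD (i - 1) ' ')) = true
      · have hk : pvKeepIdx full i = false := by rw [hkeep, hs, hp]; rfl
        simp only [PySem.List.enumerate_cons, pvBGo, hs, hp, if_pos, List.range',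
          List.length_cons, List.filter_cons, hk]
        rw [hcast] at *
        simpa using hrec
      · have hp' : (!(i == 0) && PySem.Chars.isspace (full.getD (i - 1) ' ')) = false := by
          simpa using hp
        have hk : pvKeepIdx full i = true := by rw [hkeep, hs, hp']; rfl
        simp only [PySem.List.enumerate_cons, pvBGo, hs, hp', List.range',
          List.length_cons, List.filter_cons, hk, if_true, List.map_cons,
          Bool.false_eq_true, if_false]
        rw [hcast] at *
        rw [hrec]
        simp [pvEmit, List.getD, hco, hs]
    · have hs' : PySem.Chars.isspace c = false := by simpa using hs
      rw [hs'] at hrec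
      have hk : pvKeepIdx full i = true := by rw [hkeep, hs']; rfl
      simp only [PySem.List.enumerate_cons, pvBGo, hs', List.range',
        List.length_cons, List.filter_cons, hk, List.map_cons,
        Bool.false_eq_true, if_false, if_true]
      rw [hcast] at *
      rw [hrec]
      simp [pvEmit, List.getD, hco, hs']

-- ===== VERDICT (by name: the statement is the Claim_ definition above) =====
theorem norm_with_map_py_spec : Claim_equal_norm_with_map_py := by
  intro text _
  unfold Spec_norm_with_map_py norm_with_map_py norm_with_map_py_alt
  have hA := pvAGo_eq_bGo text.toList.length text.toList 0 (Nat.le_refl _)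
  have hB := pvBGo_eq_filter text.toList text.toList 0 (by simp)
  simp only [Nat.cast_zero] at hB
  have hflag0 : (!((0 : Nat) == 0) && PySem.Chars.isspace (text.toList.getD (0 - 1) ' ')) = false := by
    rfl
  rw [hflag0] at hB
  rw [hA, hB]
  simp [List.range_eq_range']
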